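-- pv_equiv track=rewrite | github.com/kncube-stack/nx-coach-satnav | scripts/extract_duties.py | slice_first_leg
-- ===== SOURCE A (Python) =====
-- from typing import Dict, List, Optional, Tuple
--
-- def slice_first_leg(sequence: List[int], start: int, end: int) -> Optional[Tuple[int, int]]:
--     try:
--         start_index = sequence.index(start)
--     except ValueError:
--         return None
--
--     for index in range(start_index + 1, len(sequence)):
--         if sequence[index] == end:
--             return start_index, index
--
--     return None
-- ===== SOURCE B (Python) =====
-- def slice_first_leg(sequence, start, end):
--     # Back-to-front pass: keep the nearest end-index strictly to the right;
--     # at each start, overwrite the candidate so the leftmost start's pair survives.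
--     next_end = None
--     ans = None
--     for i in range(len(sequence) - 1, -1, -1):
--         v = sequence[i]
--         if v == start:
--             ans = (i, next_end) if next_end is not None else None
--         if v == end:
--             next_end = i
--     return ans
-- ===== Notes on version B (the rewrite author's own statement) =====
-- stated objective: alternative
-- what changed: B builds the answer back-to-front: a single right-to-left traversal maintains the nearest end-index strictly to the right and overwrites the candidate pair at every start, so the leftmost start's pair survives; there is no index()/find step, no forward rescan and no early exit.
import Mathlib
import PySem

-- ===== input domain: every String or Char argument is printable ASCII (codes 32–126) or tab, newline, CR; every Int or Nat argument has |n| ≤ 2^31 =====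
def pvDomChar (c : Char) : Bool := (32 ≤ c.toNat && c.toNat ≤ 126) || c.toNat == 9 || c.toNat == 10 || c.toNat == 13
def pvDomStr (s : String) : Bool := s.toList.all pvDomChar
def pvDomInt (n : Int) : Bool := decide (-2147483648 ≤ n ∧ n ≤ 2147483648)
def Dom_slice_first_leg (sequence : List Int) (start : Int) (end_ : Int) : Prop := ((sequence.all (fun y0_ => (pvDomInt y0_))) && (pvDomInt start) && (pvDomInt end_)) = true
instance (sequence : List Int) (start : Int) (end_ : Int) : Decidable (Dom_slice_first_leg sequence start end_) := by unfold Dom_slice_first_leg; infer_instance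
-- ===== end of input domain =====

-- B replaces A's index()-then-forward-rescan with a single back-to-front traversal that
-- maintains the nearest end-index to the right and overwrites the candidate at each start
-- (objective: alternative; same asymptotic cost).


-- ===== PORT A =====
-- the 'for index in range(start_index + 1, len(sequence))' loop of A
def pvAScan (sequence : List Int) (end_ : Int) : List Int → Option Int
  | [] => none
  | i :: rest =>
    if PySem.List.pyGetD sequence i 0 = end_ then some i
    else pvAScan sequence end_ rest

def slice_first_leg (sequence : List Int) (start : Int) (end_ : Int) : Option (Int × Int) :=
  match PySem.List.index? sequence start with
  | none => none     -- except ValueError: return None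
  | some start_index =>
    match pvAScan sequence end_ (PySem.List.pyRange ((start_index : Int) + 1) (PySem.List.len sequence) 1) with
    | some index => some ((start_index : Int), index)
    | none => none

-- ===== PORT B =====
-- B's reverse loop 'for i in range(len(sequence)-1, -1, -1)': structural recursion that
-- processes the tail (higher indices) first, then applies the loop body at index i; the
-- returned pair is the mutable state (next_end, ans) after the body.
def pvBRev (start end_ : Int) : List Int → Int → Option Int × Option (Int × Int)
  | [], _ => (none, none)
  | v :: rest, i =>
    let st := pvBRev start end_ rest (i + 1)
    let ans := if v = start then (match st.1 with | some j => some (i, j) | none => none) else st.2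
    let ne := if v = end_ then some i else st.1
    (ne, ans)

def slice_first_leg_alt (sequence : List Int) (start : Int) (end_ : Int) : Option (Int × Int) :=
  (pvBRev start end_ sequence 0).2

-- ===== PRECONDITION & SPEC =====
def Spec_slice_first_leg (sequence : List Int) (start : Int) (end_ : Int) (out : Option (Int × Int)) : Prop := out = slice_first_leg_alt sequence start end_
instance (sequence : List Int) (start : Int) (end_ : Int) (out : Option (Int × Int)) : Decidable (Spec_slice_first_leg sequence start end_ out) := by unfold Spec_slice_first_leg; infer_instance

-- ===== CLAIM (what is proved, stated in full; the proofs are below) =====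
def Claim_equal_slice_first_leg : Prop := ∀ (sequence : List Int) (start : Int) (end_ : Int), Dom_slice_first_leg sequence start end_ → Spec_slice_first_leg sequence start end_ (slice_first_leg sequence start end_)

-- ===== LEMMAS AND PROOFS =====

-- first index ≥ i (counting from i along xs) holding end_
def pvFindFrom (e : Int) : List Int → Int → Option Int
  | [], _ => none
  | x :: rest, i => if x = e then some i else pvFindFrom e rest (i + 1)

-- A's result described recursively over the list (first start, then first end after it)
def pvAux (start end_ : Int) : List Int → Int → Option (Int × Int)
  | [], _ => none
  | v :: rest, i =>
    if v = start then (pvFindFrom end_ rest (i + 1)).map (fun j => (i, j))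
    else pvAux start end_ rest (i + 1)

theorem pvBRev_fst (start end_ : Int) (xs : List Int) (i : Int) :
    (pvBRev start end_ xs i).1 = pvFindFrom end_ xs i := by
  induction xs generalizing i with
  | nil => rfl
  | cons v rest ih =>
    by_cases hv : v = end_ <;> simp [pvBRev, pvFindFrom, hv, ih]

theorem pvBRev_snd (start end_ : Int) (xs : List Int) (i : Int) :
    (pvBRev start end_ xs i).2 = pvAux start end_ xs i := by
  induction xs generalizing i with
  | nil => rfl
  | cons v rest ih =>
    by_cases hv : v = start
    · simp only [pvBRev, pvAux, hv, pvBRev_fst]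
      cases pvFindFrom end_ rest (i + 1) <;> rfl
    · simp [pvBRev, pvAux, hv, ih]

theorem pvAux_none_of_not_mem (start end_ : Int) (xs : List Int) (i : Int)
    (h : start ∉ xs) : pvAux start end_ xs i = none := by
  induction xs generalizing i with
  | nil => rfl
  | cons x rest ih =>
    simp only [List.mem_cons, not_or] at h
    simp only [pvAux]
    rw [if_neg (fun hh => h.1 hh.symm)]
    exact ih (i + 1) h.2

theorem pvAux_skip_prefix (start end_ : Int) (pre rest : List Int) (i : Int)
    (h : start ∉ pre) :
    pvAux start end_ (pre ++ rest) i = pvAux start end_ rest (i + pre.length) := by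
  induction pre generalizing i with
  | nil => simp
  | cons x p ih =>
    simp only [List.mem_cons, not_or] at h
    simp only [List.cons_append, pvAux]
    rw [if_neg (fun hh => h.1 hh.symm), ih (i + 1) h.2]
    congr 1
    simp only [List.length_cons]
    push_cast
    ring

theorem pvAScan_eq_findFrom (end_ : Int) (suf : List Int) :
    ∀ pre : List Int,
      pvAScan (pre ++ suf) end_
        (PySem.List.pyRange (pre.length : Int) (PySem.List.len (pre ++ suf)) 1)
      = pvFindFrom end_ suf (pre.length : Int) := by
  induction suf with
  | nil =>
    intro pre
    rw [PySem.List.pyRange_one_eq_nil (by simp [PySem.List.len_eq])]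
    rfl
  | cons x rest ih =>
    intro pre
    rw [PySem.List.pyRange_one_cons (by simp only [PySem.List.len_eq, List.length_append, List.length_cons]; push_cast; omega)]
    simp only [pvAScan, pvFindFrom]
    have hget : PySem.List.pyGetD (pre ++ x :: rest) (pre.length : Int) 0 = x := by
      simp [PySem.List.pyGetD_natCast, List.getD_eq_getElem?_getD]
    rw [hget]
    by_cases hx : x = end_
    · simp [hx]
    · have := ih (pre ++ [x])
      simp only [List.append_assoc, List.singleton_append, List.length_append,
        List.length_singleton] at this
      rw [if_neg hx, if_neg hx]
      have hcast : ((pre.length + 1 : Nat) : Int) = (pre.length : Int) + 1 := by push_cast; ring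
      rw [← hcast, this, hcast]

theorem slice_first_leg_eq_alt (sequence : List Int) (start end_ : Int) :
    slice_first_leg sequence start end_ = slice_first_leg_alt sequence start end_ := by
  unfold slice_first_leg slice_first_leg_alt
  rw [pvBRev_snd]
  rcases h : PySem.List.index? sequence start with _ | si
  · exact (pvAux_none_of_not_mem start end_ sequence 0
      ((PySem.List.index?_eq_none_iff sequence start).mp h)).symm
  · obtain ⟨pre, suf, hseq, hlen, hnm⟩ := ((PySem.List.index?_eq_some_iff sequence start si).1 h)
    subst hseq hlen
    rw [pvAux_skip_prefix start end_ pre (start :: suf) 0 hnm]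
    simp only [pvAux, reduceIte, zero_add]
    have hA := pvAScan_eq_findFrom end_ suf (pre ++ [start])
    simp only [List.append_assoc, List.singleton_append, List.length_append,
      List.length_singleton] at hA
    have hcast : ((pre.length + 1 : Nat) : Int) = (pre.length : Int) + 1 := by push_cast; ring
    rw [hcast] at hA
    rw [hA]
    rcases pvFindFrom end_ suf ((pre.length : Int) + 1) with _ | j <;> rfl

-- ===== VERDICT (by name: the statement is the Claim_ definition above) =====
theorem slice_first_leg_spec : Claim_equal_slice_first_leg := by
  intro sequence start end_ _
  unfold Spec_slice_first_leg
  exact slice_first_leg_eq_alt sequence start end_
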